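-- pv_equiv track=rewrite | github.com/tetrapus/Karkat | plugins/wolfram/parser.py | bracket_chunk
-- ===== SOURCE A (Python) =====
-- def bracket_chunk(data):
--     """ Join all the lines with unbalanced brackets. """
--     tension = 0
--     chunks = []
--     for i in data:
--         if tension == 0:
--             chunks.append(i)
--         else:
--             chunks[-1] += "\n" + i
--         tension += get_parenthetic_degree(i)
--     return chunks
--
-- def get_parenthetic_degree(line):
--     """ Checks the parenthesis balance. """
--     return line.count("(") - line.count(")")
-- ===== SOURCE B (Python) =====
-- def bracket_chunk(data):
--     """ Join all the lines with unbalanced brackets (buffer-and-flush). """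
--     chunks = []
--     buf = []
--     balance = 0
--     for line in data:
--         buf.append(line)
--         balance += get_parenthetic_degree(line)
--         if balance == 0:
--             chunks.append("\n".join(buf))
--             buf = []
--     if buf:
--         chunks.append("\n".join(buf))
--     return chunks
--
-- def get_parenthetic_degree(line):
--     """ Checks the parenthesis balance. """
--     return line.count("(") - line.count(")")
-- ===== Notes on version B (the rewrite author's own statement) =====
-- stated objective: alternative
-- what changed: B buffers the lines of the current group in a list and flushes them with a single '\n'.join whenever the running balance returns to 0 (plus a final flush), instead of A's repeated in-place string concatenation onto chunks[-1].
import Mathlib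
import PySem

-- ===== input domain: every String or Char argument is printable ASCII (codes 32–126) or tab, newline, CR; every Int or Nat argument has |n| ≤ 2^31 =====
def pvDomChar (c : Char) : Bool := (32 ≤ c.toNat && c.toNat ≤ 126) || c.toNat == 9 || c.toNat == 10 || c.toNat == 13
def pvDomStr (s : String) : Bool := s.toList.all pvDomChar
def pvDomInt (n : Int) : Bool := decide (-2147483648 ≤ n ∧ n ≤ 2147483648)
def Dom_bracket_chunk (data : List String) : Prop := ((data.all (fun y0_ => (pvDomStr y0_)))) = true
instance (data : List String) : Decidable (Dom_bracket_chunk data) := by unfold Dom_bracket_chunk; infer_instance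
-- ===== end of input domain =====

-- B changes the decomposition: it buffers the lines of the current group and flushes them with one
-- '\n'.join when the running balance hits 0 (plus a final flush), instead of A's in-place += on chunks[-1].

-- ===== PORT A =====
-- get_parenthetic_degree(line) = line.count("(") - line.count(")")
def get_parenthetic_degree (line : String) : Int :=
  (PySem.Str.count line "(" : Int) - (PySem.Str.count line ")" : Int)

-- A's loop: state (tension, chunks); 'chunks[-1] += "\n" + i' is rebuild-last
-- (the empty-chunks branch is unreachable: tension starts at 0, so the first line opens a chunk).
def bracket_chunk_go : Int → List String → List String → List String
  | _, chunks, [] => chunks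
  | tension, chunks, i :: rest =>
    let chunks' := if tension = 0 then chunks ++ [i]
      else chunks.dropLast ++ [chunks.getLastD "" ++ "\n" ++ i]
    bracket_chunk_go (tension + get_parenthetic_degree i) chunks' rest

def bracket_chunk (data : List String) : List String :=
  bracket_chunk_go 0 [] data

-- ===== PORT B =====
-- B's loop: state (balance, chunks, buf); flush '\n'.join(buf) when balance = 0, final flush after.
def bracket_chunk_alt_go : Int → List String → List String → List String → List String
  | _, chunks, buf, [] => if buf = [] then chunks else chunks ++ [PySem.Str.join "\n" buf]
  | balance, chunks, buf, line :: rest =>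
    let buf' := buf ++ [line]
    let balance' := balance + get_parenthetic_degree line
    if balance' = 0 then bracket_chunk_alt_go balance' (chunks ++ [PySem.Str.join "\n" buf']) [] rest
    else bracket_chunk_alt_go balance' chunks buf' rest

def bracket_chunk_alt (data : List String) : List String :=
  bracket_chunk_alt_go 0 [] [] data

-- ===== PRECONDITION & SPEC =====
def Spec_bracket_chunk (data : List String) (out : List String) : Prop := out = bracket_chunk_alt data
instance (data : List String) (out : List String) : Decidable (Spec_bracket_chunk data out) := by unfold Spec_bracket_chunk; infer_instance

-- ===== CLAIM (what is proved, stated in full; the proofs are below) =====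
def Claim_equal_bracket_chunk : Prop := ∀ (data : List String), Dom_bracket_chunk data → Spec_bracket_chunk data (bracket_chunk data)

-- ===== LEMMAS AND PROOFS =====

lemma join_singleton (i : String) : PySem.Str.join "\n" [i] = i := by
  apply String.toList_inj.mp
  simp [PySem.Chars.join_singleton]

lemma chars_join_concat (sep : List Char) :
    ∀ (ps : List (List Char)) (x : List Char), ps ≠ [] →
      PySem.Chars.join sep (ps ++ [x]) = PySem.Chars.join sep ps ++ sep ++ x := by
  intro ps
  induction ps with
  | nil => intro x h; exact absurd rfl h
  | cons a tl ih =>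
    intro x _
    cases tl with
    | nil => simp [PySem.Chars.join_cons_cons, PySem.Chars.join_singleton]
    | cons b tl' =>
      have h2 := ih x (by simp)
      simp only [List.cons_append] at h2 ⊢
      rw [PySem.Chars.join_cons_cons, h2, PySem.Chars.join_cons_cons]
      simp

lemma join_concat (buf : List String) (i : String) (h : buf ≠ []) :
    PySem.Str.join "\n" (buf ++ [i]) = PySem.Str.join "\n" buf ++ "\n" ++ i := by
  apply String.toList_inj.mp
  simp only [PySem.Str.toList_join, List.map_append, List.map_cons, List.map_nil,
    String.toList_append]
  exact chars_join_concat _ _ _ (by simpa using h)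

-- the last pending chunk A's state carries: '\n'.join(buf) if buf is nonempty
def pendingChunk (buf : List String) : List String :=
  if buf = [] then [] else [PySem.Str.join "\n" buf]

lemma go_eq (rest : List String) : ∀ (t : Int) (chunks buf : List String),
    (buf = [] ↔ t = 0) →
    bracket_chunk_go t (chunks ++ pendingChunk buf) rest = bracket_chunk_alt_go t chunks buf rest := by
  induction rest with
  | nil =>
    intro t chunks buf _
    by_cases hb : buf = [] <;> simp [bracket_chunk_go, bracket_chunk_alt_go, pendingChunk, hb]
  | cons i rest ih =>
    intro t chunks buf hinv
    by_cases ht : t = 0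
    · have hb : buf = [] := hinv.mpr ht
      subst hb ht
      simp only [bracket_chunk_go, bracket_chunk_alt_go, pendingChunk, if_pos rfl,
        List.nil_append, zero_add]
      by_cases hd : get_parenthetic_degree i = 0
      · rw [if_pos hd, ← ih (get_parenthetic_degree i)
          (chunks ++ [PySem.Str.join "\n" [i]]) [] (by simp [hd])]
        simp [pendingChunk, join_singleton]
      · rw [if_neg hd, ← ih (get_parenthetic_degree i) chunks [i] (by simp [hd])]
        simp [pendingChunk, join_singleton]
    · have hb : buf ≠ [] := fun h => ht (hinv.mp h)
      simp only [bracket_chunk_go, bracket_chunk_alt_go, pendingChunk, if_neg hb, if_neg ht]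
      have hlast : (chunks ++ [PySem.Str.join "\n" buf]).dropLast ++
          [(chunks ++ [PySem.Str.join "\n" buf]).getLastD "" ++ "\n" ++ i]
          = chunks ++ [PySem.Str.join "\n" (buf ++ [i])] := by
        rw [List.dropLast_concat, List.getLastD_concat, join_concat buf i hb]
      rw [hlast]
      by_cases hz : t + get_parenthetic_degree i = 0
      · rw [if_pos hz, ← ih (t + get_parenthetic_degree i)
          (chunks ++ [PySem.Str.join "\n" (buf ++ [i])]) [] (by simp [hz])]
        simp [pendingChunk]
      · rw [if_neg hz, ← ih (t + get_parenthetic_degree i) chunks (buf ++ [i]) (by simp [hz])]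
        simp [pendingChunk, hb]

-- ===== VERDICT (by name: the statement is the Claim_ definition above) =====
theorem bracket_chunk_spec : Claim_equal_bracket_chunk := by
  intro data _
  unfold Spec_bracket_chunk bracket_chunk bracket_chunk_alt
  simpa [pendingChunk] using go_eq data 0 [] [] (by simp)
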